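-- pv_equiv track=rewrite | github.com/b4sgren/adventOfCode | 2023/day14.py | shiftNorth
-- ===== SOURCE A (Python) =====
-- from copy import deepcopy as copy
--
-- def shiftNorth(input):
--     map = copy(input)
--
--     num_cols = len(map[0])
--     num_rows = len(map)
--     for i in range(num_cols):
--         for j in range(0, num_rows):
--             if map[j][i] != 'O':
--                 continue
--             for k in range(j, 0, -1):
--                 if map[k-1][i] == '#' or map[k-1][i] == 'O':
--                     break
--                 map[k-1][i] = 'O'
--                 map[k][i] = '.'
--     return map
-- ===== SOURCE B (Python) =====
-- def _last_rock(seg):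
--     # 1 + index of the last 'O' in seg, 0 if seg has no 'O'
--     last = 0
--     for idx, c in enumerate(seg):
--         if c == 'O':
--             last = idx + 1
--     return last
--
--
-- def _settle(col):
--     # one pass per column: rebuild each '#'-free segment in closed form
--     res = []
--     j = 0
--     n = len(col)
--     while j < n:
--         if col[j] == '#':
--             res.append('#')
--             j += 1
--         else:
--             k = j
--             while k < n and col[k] != '#':
--                 k += 1
--             seg = col[j:k]
--             cnt = seg.count('O')
--             last = _last_rock(seg)
--             res.extend(['O'] * cnt + ['.'] * (last - cnt) + seg[last:])
--             j = k
--     return res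
--
--
-- def shiftNorth(input):
--     grid = [list(row) for row in input]
--     num_cols = len(grid[0])
--     for i in range(num_cols):
--         new_col = _settle([row[i] for row in grid])
--         for j, v in enumerate(new_col):
--             grid[j][i] = v
--     return grid
-- ===== Notes on version B (the rewrite author's own statement) =====
-- stated objective: faster
-- what changed: A bubbles every rock north one cell at a time with a third nested loop; B rebuilds each '#'-delimited segment of every column in closed form (count of rocks, position after the last rock) in a single scan per column.
import Mathlib
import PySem

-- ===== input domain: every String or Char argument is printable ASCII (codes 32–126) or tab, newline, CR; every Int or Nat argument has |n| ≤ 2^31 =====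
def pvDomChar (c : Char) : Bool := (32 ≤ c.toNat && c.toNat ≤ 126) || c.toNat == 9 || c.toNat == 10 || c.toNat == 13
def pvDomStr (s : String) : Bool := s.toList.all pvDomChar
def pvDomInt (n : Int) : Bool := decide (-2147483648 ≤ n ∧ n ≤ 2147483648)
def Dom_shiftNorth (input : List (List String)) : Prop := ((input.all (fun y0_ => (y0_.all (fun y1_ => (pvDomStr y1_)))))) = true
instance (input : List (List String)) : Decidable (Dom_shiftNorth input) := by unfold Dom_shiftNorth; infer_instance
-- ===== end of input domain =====

-- B replaces A's per-rock bubbling (O(rows²) per column) by rebuilding each '#'-free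
-- segment of a column in closed form in one scan (O(rows) per column); return-value
-- equivalence only (neither implementation mutates its argument's rows observably here).

-- ===== PORT A =====
-- cell read/write of map[j][i]; getD/set are exact under Pre_ (all indices are in range there)
def getCell (g : List (List String)) (j i : Nat) : String := (g.getD j []).getD i ""

def setCell (g : List (List String)) (j i : Nat) (v : String) : List (List String) :=
  g.set j ((g.getD j []).set i v)

-- 'for k in range(j, 0, -1): …' — argument is Python's k; k'+1 here is Python's k
def innerA (i : Nat) : Nat → List (List String) → List (List String)
  | 0, g => g
  | k + 1, g =>
    if getCell g k i = "#" ∨ getCell g k i = "O" then g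
    else innerA i k (setCell (setCell g k i "O") (k + 1) i ".")

def shiftNorth (input : List (List String)) : List (List String) :=
  let numCols := (input.getD 0 []).length
  let numRows := input.length
  (List.range numCols).foldl (fun m i =>
    (List.range numRows).foldl (fun m j =>
      if getCell m j i ≠ "O" then m else innerA i j m) m) input

-- ===== PORT B =====
-- 1 + index of the last 'O' in seg, 0 if none (Source B's _last_rock)
def lastRock (seg : List String) : Int :=
  (PySem.List.enumerate seg).foldl (fun last p => if p.2 = "O" then p.1 + 1 else last) 0

-- one '#'-free segment rebuilt in closed form: ['O']*cnt + ['.']*(last-cnt) + seg[last:]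
def settleSeg (seg : List String) : List String :=
  let cnt := PySem.List.count seg "O"
  let last := lastRock seg
  PySem.List.pyRepeat ["O"] (cnt : Int) ++ PySem.List.pyRepeat ["."] (last - (cnt : Int)) ++
    PySem.List.slice seg (some last) none

-- Source B's _settle: walk the column, copying '#' and rebuilding each '#'-free segment
def settle : List String → List String
  | [] => []
  | c :: rest =>
    if c = "#" then "#" :: settle rest
    else settleSeg (c :: rest.takeWhile (· != "#")) ++ settle (rest.dropWhile (· != "#"))
termination_by col => col.length
decreasing_by
  · simp
  · exact Nat.lt_succ_of_le (List.length_dropWhile_le _ _)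

def shiftNorth_alt (input : List (List String)) : List (List String) :=
  let numCols := (input.getD 0 []).length
  (List.range numCols).foldl (fun g i =>
    let newCol := settle (g.map (fun row => row.getD i ""))
    (PySem.List.enumerate newCol).foldl (fun g p => setCell g p.1.toNat i p.2) g) input

-- ===== PRECONDITION & SPEC =====
-- Pre_ excludes exactly the inputs where Python A raises IndexError: the empty grid
-- (map[0]) and grids with a row shorter than the first row (map[j][i], i < len(map[0])).
def Pre_shiftNorth (input : List (List String)) : Prop :=
  input ≠ [] ∧ ∀ r ∈ input, (input.getD 0 []).length ≤ r.length

instance (input : List (List String)) : Decidable (Pre_shiftNorth input) := by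
  unfold Pre_shiftNorth; infer_instance

def pvWitness_shiftNorth : List (List String) :=
  [[".", "."], ["O", "#"], [".", "O"]]

def Spec_shiftNorth (input : List (List String)) (out : List (List String)) : Prop := out = shiftNorth_alt input
instance (input : List (List String)) (out : List (List String)) : Decidable (Spec_shiftNorth input out) := by unfold Spec_shiftNorth; infer_instance

-- ===== CLAIM (what is proved, stated in full; the proofs are below) =====
def Claim_equal_shiftNorth : Prop := ∀ (input : List (List String)), Dom_shiftNorth input → Pre_shiftNorth input → Spec_shiftNorth input (shiftNorth input)

-- ===== LEMMAS AND PROOFS =====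

-- ---- column-level model of A's j/k loops ----
def innerC : Nat → List String → List String
  | 0, c => c
  | k + 1, c =>
    if c.getD k "" = "#" ∨ c.getD k "" = "O" then c
    else innerC k ((c.set k "O").set (k + 1) ".")

def stepC (c : List String) (j : Nat) : List String :=
  if c.getD j "" ≠ "O" then c else innerC j c

-- 1 + index of last "O" (Nat version used by the proofs)
def lastN : List String → Nat
  | [] => 0
  | x :: rest => if lastN rest = 0 then (if x = "O" then 1 else 0) else lastN rest + 1

def stack (s : List String) : List String :=
  List.replicate (s.count "O") "O" ++ List.replicate (lastN s - s.count "O") "." ++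
    s.drop (lastN s)

def colOf (g : List (List String)) (i : Nat) : List String := g.map (fun r => r.getD i "")

def writeCol (g : List (List String)) (i : Nat) (c : List String) : List (List String) :=
  List.zipWith (fun r v => r.set i v) g c

-- ---- small list facts ----
theorem getD_append_len {α : Type} (P u : List α) (x d : α) :
    (P ++ x :: u).getD P.length d = x := by simp [List.getD]

theorem getD_append_add {α : Type} (P l₂ : List α) (n : Nat) (d : α) :
    (P ++ l₂).getD (P.length + n) d = l₂.getD n d := by
  induction P with
  | nil => simp
  | cons x P ih => simpa [List.getD, Nat.add_right_comm] using ih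

theorem set_append_len {α : Type} (P u : List α) (x v : α) :
    (P ++ x :: u).set P.length v = P ++ v :: u := by rw [List.set_append]; simp

theorem set_append_add {α : Type} (P l₂ : List α) (n : Nat) (v : α) :
    (P ++ l₂).set (P.length + n) v = P ++ l₂.set n v := by rw [List.set_append]; simp

-- ---- lastN / stack facts ----
theorem lastN_le_length (s : List String) : lastN s ≤ s.length := by
  induction s with
  | nil => simp [lastN]
  | cons x rest ih => simp only [lastN, List.length_cons]; split_ifs <;> omega

theorem lastN_eq_zero_iff (s : List String) : lastN s = 0 ↔ s.count "O" = 0 := by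
  induction s with
  | nil => simp [lastN]
  | cons x rest ih =>
    simp only [lastN, List.count_cons]
    split_ifs with h1 h2 <;> simp_all <;> omega

theorem count_le_lastN (s : List String) : s.count "O" ≤ lastN s := by
  induction s with
  | nil => simp [lastN]
  | cons x rest ih =>
    have h0 := lastN_eq_zero_iff rest
    have hl := List.count_le_length (l := rest) (a := "O")
    simp only [lastN, List.count_cons]
    split_ifs with h1 h2 <;> simp_all <;> omega

theorem drop_lastN_not_O (s : List String) : ∀ x ∈ s.drop (lastN s), x ≠ "O" := by
  induction s with
  | nil => simp [lastN]
  | cons y rest ih =>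
    intro x hx
    by_cases h0 : lastN rest = 0
    · have hc : rest.count "O" = 0 := (lastN_eq_zero_iff rest).1 h0
      have hns : ∀ z ∈ rest, z ≠ "O" := by
        intro z hz hzo; subst hzo
        exact absurd hc (by simpa [List.count_eq_zero] using hz)
      have hL : lastN (y :: rest) = if y = "O" then 1 else 0 := by simp [lastN, h0]
      by_cases hy : y = "O"
      · rw [hL, if_pos hy] at hx
        exact hns x (by simpa using hx)
      · rw [hL, if_neg hy] at hx
        simp only [List.drop_zero] at hx
        rcases List.mem_cons.1 hx with h | h
        · subst h; exact hy
        · exact hns x h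
    · simp only [lastN, if_neg h0] at hx
      simp only [List.drop_succ_cons] at hx
      exact ih x hx

theorem stack_length (s : List String) : (stack s).length = s.length := by
  have h1 := count_le_lastN s
  have h2 := lastN_le_length s
  simp only [stack, List.length_append, List.length_replicate, List.length_drop]
  omega

theorem lastN_append_single (s : List String) (a : String) :
    lastN (s ++ [a]) = if a = "O" then s.length + 1 else lastN s := by
  induction s with
  | nil => simp [lastN]
  | cons x rest ih =>
    by_cases ha : a = "O"
    · subst ha; simp [lastN, ih]
    · simp [lastN, ih, ha]

-- ---- A's inner slide loop in closed form ----
theorem innerC_slide (w : List String) (hw : ∀ x ∈ w, x ≠ "#" ∧ x ≠ "O") :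
    ∀ (t : List String) (cnt : Nat),
      innerC (cnt + w.length) (List.replicate cnt "O" ++ w ++ "O" :: t) =
        List.replicate (cnt + 1) "O" ++ List.replicate w.length "." ++ t := by
  induction w using List.reverseRecOn with
  | nil =>
    intro t cnt
    cases cnt with
    | zero => simp [innerC]
    | succ m =>
      have hsp : List.replicate (m+1) "O" ++ ([] : List String) ++ "O" :: t
          = List.replicate m "O" ++ "O" :: ("O" :: t) := by
        simp [List.replicate_succ']
      have hget : (List.replicate (m+1) "O" ++ ([] : List String) ++ "O" :: t).getD m "" = "O" := by
        rw [hsp]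
        simpa using getD_append_len (List.replicate m "O") ("O" :: t) "O" ""
      show innerC (m + 1 + 0) _ = _
      simp only [Nat.add_zero, innerC, hget]
      simp [hsp, List.replicate_succ']
  | append_singleton w' b ih =>
    intro t cnt
    have hb := hw b (by simp)
    have hw' : ∀ x ∈ w', x ≠ "#" ∧ x ≠ "O" := fun x hx => hw x (by simp [hx])
    have hlen : (List.replicate cnt "O" ++ w').length = cnt + w'.length := by simp
    have hL : List.replicate cnt "O" ++ (w' ++ [b]) ++ "O" :: t
        = (List.replicate cnt "O" ++ w') ++ b :: "O" :: t := by simp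
    have hget : (List.replicate cnt "O" ++ (w' ++ [b]) ++ "O" :: t).getD (cnt + w'.length) "" = b := by
      rw [hL, ← hlen]; exact getD_append_len _ _ _ _
    simp only [List.length_append, List.length_cons, List.length_nil]
    rw [show cnt + (w'.length + (0 + 1)) = (cnt + w'.length) + 1 from by omega]
    simp only [innerC, hget, hb.1, hb.2, false_or, if_false]
    rw [hL, ← hlen, set_append_len]
    have h2 : ((List.replicate cnt "O" ++ w') ++ "O" :: "O" :: t).set ((List.replicate cnt "O" ++ w').length + 1) "."
        = (List.replicate cnt "O" ++ w') ++ "O" :: "." :: t := by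
      have := set_append_add (List.replicate cnt "O" ++ w') ("O" :: "O" :: t) 1 "."
      simpa using this
    rw [hlen] at h2 ⊢
    rw [h2]
    have h3 : (List.replicate cnt "O" ++ w') ++ "O" :: "." :: t
        = List.replicate cnt "O" ++ w' ++ "O" :: ("." :: t) := by simp
    rw [h3, ih hw' ("." :: t) cnt]
    simp [List.replicate_succ']

-- ---- the j-loop over one '#'-free segment ----
theorem foldl_seg (s : List String) (hs : ∀ x ∈ s, x ≠ "#") :
    ∀ r, (List.range s.length).foldl stepC (s ++ r) = stack s ++ r := by
  induction s using List.reverseRecOn with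
  | nil => intro r; simp [stack, lastN]
  | append_singleton s a ih =>
    intro r
    have hs' : ∀ x ∈ s, x ≠ "#" := fun x hx => hs x (by simp [hx])
    have ha := hs a (by simp)
    simp only [List.length_append, List.length_cons, List.length_nil, Nat.add_zero]
    rw [show s.length + (0 + 1) = s.length + 1 from by omega, List.range_succ,
      List.foldl_append]
    have h1 : (s ++ [a]) ++ r = s ++ ([a] ++ r) := by simp
    rw [h1, ih hs' ([a] ++ r)]
    have hget : (stack s ++ ([a] ++ r)).getD s.length "" = a := by
      have := getD_append_len (stack s) r a ""
      rw [stack_length] at this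
      simpa using this
    simp only [List.foldl_cons, List.foldl_nil]
    by_cases haO : a = "O"
    · subst haO
      unfold stepC
      rw [hget]
      simp only [ne_eq, not_true_eq_false, if_false, reduceIte]
      have hcnt := count_le_lastN s
      have hlast := lastN_le_length s
      have hstack : stack s ++ (["O"] ++ r)
          = List.replicate (s.count "O") "O" ++
            (List.replicate (lastN s - s.count "O") "." ++ s.drop (lastN s)) ++ "O" :: r := by
        simp [stack]
      have hw : ∀ x ∈ List.replicate (lastN s - s.count "O") "." ++ s.drop (lastN s),
          x ≠ "#" ∧ x ≠ "O" := by
        intro x hx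
        rcases List.mem_append.1 hx with h | h
        · have := List.eq_of_mem_replicate h; subst this; constructor <;> decide
        · exact ⟨hs' x (List.mem_of_mem_drop h), drop_lastN_not_O s x h⟩
      have hwl : (List.replicate (lastN s - s.count "O") "." ++ s.drop (lastN s)).length
          = s.length - s.count "O" := by simp; omega
      have harg : s.length = s.count "O" + (List.replicate (lastN s - s.count "O") "." ++ s.drop (lastN s)).length := by
        rw [hwl]; omega
      rw [hstack, harg, innerC_slide _ hw r (s.count "O")]
      rw [hwl]
      have hst : stack (s ++ ["O"]) = List.replicate (s.count "O" + 1) "O" ++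
          List.replicate (s.length - s.count "O") "." := by
        unfold stack
        rw [lastN_append_single]
        simp only [if_pos rfl]
        rw [List.count_append, List.drop_eq_nil_of_le (by simp)]
        simp [show s.length + 1 - (s.count "O" + 1) = s.length - s.count "O" from by omega]
      rw [hst]
    · unfold stepC
      rw [hget]
      simp only [ne_eq, haO, not_false_eq_true, if_true, reduceIte]
      have hst : stack (s ++ [a]) = stack s ++ [a] := by
        unfold stack
        rw [lastN_append_single, if_neg haO, List.count_append,
          List.drop_append_of_le_length (lastN_le_length s)]
        simp [haO]
      rw [hst]
      simp

-- ---- shifting past a settled prefix ending in '#' ----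
theorem innerC_shift (k : Nat) (p v : List String) :
    innerC (p.length + 1 + k) (p ++ "#" :: v) = p ++ "#" :: innerC k v := by
  induction k generalizing v with
  | zero =>
    simp only [Nat.add_zero, innerC]
    rw [getD_append_len]
    simp [innerC]
  | succ k ih =>
    rw [show p.length + 1 + (k + 1) = (p.length + 1 + k) + 1 from by omega]
    simp only [innerC]
    have hg : (p ++ "#" :: v).getD (p.length + 1 + k) "" = v.getD k "" := by
      rw [show p.length + 1 + k = p.length + (1 + k) from by omega, getD_append_add]
      simp [List.getD, Nat.add_comm]
    by_cases hc : v.getD k "" = "#" ∨ v.getD k "" = "O"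
    · have hc' : (p ++ "#" :: v).getD (p.length + 1 + k) "" = "#" ∨
          (p ++ "#" :: v).getD (p.length + 1 + k) "" = "O" := by rw [hg]; exact hc
      rw [if_pos hc', if_pos hc]
    · have hc' : ¬ ((p ++ "#" :: v).getD (p.length + 1 + k) "" = "#" ∨
          (p ++ "#" :: v).getD (p.length + 1 + k) "" = "O") := by rw [hg]; exact hc
      rw [if_neg hc', if_neg hc]
      have hset1 : (p ++ "#" :: v).set (p.length + 1 + k) "O" = p ++ "#" :: v.set k "O" := by
        rw [show p.length + 1 + k = p.length + (1 + k) from by omega, set_append_add]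
        simp [Nat.add_comm]
      have hset2 : (p ++ "#" :: v.set k "O").set (p.length + 1 + k + 1) "."
          = p ++ "#" :: (v.set k "O").set (k + 1) "." := by
        rw [show p.length + 1 + k + 1 = p.length + (1 + (k + 1)) from by omega, set_append_add]
        rw [show (1:Nat) + (k + 1) = (k + 1) + 1 from by omega]
        simp
      rw [hset1, hset2, ih]

theorem stepC_shift (p v : List String) (j : Nat) :
    stepC (p ++ "#" :: v) (p.length + 1 + j) = p ++ "#" :: stepC v j := by
  unfold stepC
  have hg : (p ++ "#" :: v).getD (p.length + 1 + j) "" = v.getD j "" := by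
    rw [show p.length + 1 + j = p.length + (1 + j) from by omega, getD_append_add]
    simp [List.getD, Nat.add_comm]
  rw [hg]
  by_cases hc : v.getD j "" = "O"
  · simp only [hc, ne_eq, not_true_eq_false, if_false, reduceIte]
    exact innerC_shift j p v
  · have hc2 : ¬ v[j]?.getD "" = "O" := hc
    simp [hc2]

theorem foldl_shift (l : List Nat) (p : List String) :
    ∀ v, l.foldl (fun c j => stepC c (p.length + 1 + j)) (p ++ "#" :: v) =
      p ++ "#" :: l.foldl stepC v := by
  induction l with
  | nil => intro v; rfl
  | cons j l ih => intro v; simp only [List.foldl_cons, stepC_shift]; exact ih (stepC v j)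

theorem foldl_shift_nil (l : List Nat) (v : List String) :
    l.foldl (fun c j => stepC c (j + 1)) ("#" :: v) = "#" :: l.foldl stepC v := by
  have h := foldl_shift l [] v
  simpa [Nat.add_comm] using h

-- ---- B's settleSeg computes stack ----
theorem lastRock_fold (s : List String) : ∀ (st acc : Int),
    (PySem.List.enumerate s st).foldl (fun last p => if p.2 = "O" then p.1 + 1 else last) acc
      = if lastN s = 0 then acc else st + lastN s := by
  induction s with
  | nil => intro st acc; simp [PySem.List.enumerate, lastN]
  | cons x s ih =>
    intro st acc
    rw [PySem.List.enumerate_cons, List.foldl_cons, ih]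
    simp only [lastN]
    by_cases h0 : lastN s = 0 <;> by_cases hx : x = "O" <;>
      simp [h0, hx] <;> omega

theorem lastRock_eq (s : List String) : lastRock s = (lastN s : Int) := by
  unfold lastRock
  rw [lastRock_fold]
  split_ifs with h <;> simp [h]

theorem settleSeg_eq_stack (s : List String) : settleSeg s = stack s := by
  unfold settleSeg stack
  simp only [PySem.List.count_eq, lastRock_eq, PySem.List.pyRepeat_singleton,
    PySem.List.slice_from_natCast, Int.toNat_natCast]
  have h : ((lastN s : Int) - (List.count "O" s : Int)).toNat = lastN s - List.count "O" s := by
    omega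
  rw [h]

theorem head_dropWhile (rest : List String) (y : String) (t' : List String)
    (h : rest.dropWhile (· != "#") = y :: t') : y = "#" := by
  have := List.head?_dropWhile_not (p := (· != "#")) rest
  rw [h] at this
  simpa using this

-- ---- the column theorem: A's j-loop equals B's settle ----
theorem rowC_aux : ∀ (n : Nat) (c : List String), c.length ≤ n →
    (List.range c.length).foldl stepC c = settle c := by
  intro n
  induction n with
  | zero =>
    intro c hc
    have : c = [] := List.eq_nil_of_length_eq_zero (by omega)
    subst this; simp [settle]
  | succ n ih =>
    intro c hc
    match c with
    | [] => simp [settle]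
    | x :: rest =>
      by_cases hx : x = "#"
      · subst hx
        rw [show settle ("#" :: rest) = "#" :: settle rest from by rw [settle]; simp]
        simp only [List.length_cons, List.range_succ_eq_map, List.foldl_cons]
        have hstep0 : stepC ("#" :: rest) 0 = "#" :: rest := by
          unfold stepC; simp [List.getD]
        rw [hstep0, List.foldl_map]
        have hfun : (fun (c : List String) (j : Nat) => stepC c (Nat.succ j))
            = (fun c j => stepC c (j + 1)) := by funext c j; rfl
        rw [hfun, foldl_shift_nil, ih rest (by simpa using Nat.le_of_succ_le_succ hc)]
      · have hsplit : x :: rest = (x :: rest.takeWhile (· != "#")) ++ rest.dropWhile (· != "#") := by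
          simp [List.takeWhile_append_dropWhile]
        have hsfree : ∀ z ∈ x :: rest.takeWhile (· != "#"), z ≠ "#" := by
          intro z hz
          rcases List.mem_cons.1 hz with h | h
          · subst h; exact hx
          · have := List.mem_takeWhile_imp h; simpa using this
        have hsettle : settle (x :: rest) =
            settleSeg (x :: rest.takeWhile (· != "#")) ++ settle (rest.dropWhile (· != "#")) := by
          rw [settle]; simp [hx]
        cases ht : rest.dropWhile (· != "#") with
        | nil =>
          have hceq : x :: rest = x :: rest.takeWhile (· != "#") := by
            conv_lhs => rw [hsplit, ht]
            simp
          rw [hsettle, ht, show settle [] = [] from by rw [settle]]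
          conv_lhs => rw [hceq]
          have := foldl_seg (x :: rest.takeWhile (· != "#")) hsfree []
          simpa [settleSeg_eq_stack] using this
        | cons y t' =>
          have hy : y = "#" := head_dropWhile rest y t' ht
          subst hy
          have hceq : x :: rest = (x :: rest.takeWhile (· != "#")) ++ "#" :: t' := by
            conv_lhs => rw [hsplit, ht]
          rw [hsettle, ht]
          conv_lhs => rw [hceq]
          rw [show ((x :: rest.takeWhile (· != "#")) ++ "#" :: t').length
              = (x :: rest.takeWhile (· != "#")).length + (1 + t'.length) from by simp; omega]
          rw [List.range_add, List.foldl_append, foldl_seg _ hsfree ("#" :: t'), List.foldl_map]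
          rw [show 1 + t'.length = t'.length + 1 from by omega, List.range_succ_eq_map,
            List.foldl_cons]
          have hstep0 : stepC (stack (x :: rest.takeWhile (· != "#")) ++ "#" :: t')
              ((x :: rest.takeWhile (· != "#")).length + 0) = stack (x :: rest.takeWhile (· != "#")) ++ "#" :: t' := by
            unfold stepC
            have hg : (stack (x :: rest.takeWhile (· != "#")) ++ "#" :: t').getD
                ((x :: rest.takeWhile (· != "#")).length + 0) "" = "#" := by
              have := getD_append_len (stack (x :: rest.takeWhile (· != "#"))) t' "#" ""
              rw [stack_length] at this
              simpa using this
            rw [hg]; simp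
          rw [hstep0, List.foldl_map]
          have hfun : (fun (c : List String) (j : Nat) =>
                stepC c ((x :: rest.takeWhile (· != "#")).length + Nat.succ j))
              = (fun c j => stepC c ((stack (x :: rest.takeWhile (· != "#"))).length + 1 + j)) := by
            funext c j
            rw [stack_length]
            congr 1
            omega
          rw [hfun, foldl_shift]
          have ht'len : t'.length ≤ n := by
            have h1 : rest.length = (rest.takeWhile (· != "#")).length + (t'.length + 1) := by
              conv_lhs => rw [← List.takeWhile_append_dropWhile (p := (· != "#")) (l := rest)]
              rw [ht]; simp
            simp only [List.length_cons] at hc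
            omega
          rw [ih t' ht'len, settleSeg_eq_stack,
            show settle ("#" :: t') = "#" :: settle t' from by rw [settle]; simp]

theorem length_innerC (k : Nat) : ∀ (c : List String), (innerC k c).length = c.length := by
  induction k with
  | zero => intro c; rfl
  | succ k ih =>
    intro c
    simp only [innerC]
    split_ifs
    · rfl
    · rw [ih]; simp

theorem length_stepC (c : List String) (j : Nat) : (stepC c j).length = c.length := by
  unfold stepC
  split_ifs
  · rfl
  · exact length_innerC j c

theorem settle_length (c : List String) : (settle c).length = c.length := by
  have h := rowC_aux c.length c (le_refl _)
  rw [← h]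
  have : ∀ (l : List Nat) (c : List String), (l.foldl stepC c).length = c.length := by
    intro l
    induction l with
    | nil => intro c; rfl
    | cons j l ihl => intro c; rw [List.foldl_cons, ihl, length_stepC]
  rw [this]

-- ---- grid/column simulation ----
theorem length_colOf (g : List (List String)) (i : Nat) : (colOf g i).length = g.length := by
  simp [colOf]

theorem length_writeCol (g : List (List String)) (i : Nat) (c : List String)
    (h : c.length = g.length) : (writeCol g i c).length = g.length := by
  simp [writeCol, h]

theorem getCell_writeCol : ∀ (g : List (List String)) (i : Nat) (c : List String) (j : Nat),
    (∀ r ∈ g, i < r.length) → c.length = g.length →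
    getCell (writeCol g i c) j i = c.getD j "" := by
  intro g
  induction g with
  | nil =>
    intro i c j hInv hlen
    have : c = [] := List.eq_nil_of_length_eq_zero (by simpa using hlen)
    subst this
    simp [writeCol, getCell, List.getD]
  | cons r g ih =>
    intro i c j hInv hlen
    cases c with
    | nil => simp at hlen
    | cons v c' =>
      have hwc : writeCol (r :: g) i (v :: c') = (r.set i v) :: writeCol g i c' := rfl
      rw [hwc]
      cases j with
      | zero =>
        have hi : i < r.length := hInv r (by simp)
        simp [getCell, List.getD, List.getElem?_set_self, hi]
      | succ j =>
        have : getCell ((r.set i v) :: writeCol g i c') (j + 1) i = getCell (writeCol g i c') j i := by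
          simp [getCell, List.getD]
        rw [this]
        exact ih i c' j (fun r' hr' => hInv r' (by simp [hr'])) (by simpa using hlen)

theorem setCell_writeCol : ∀ (g : List (List String)) (i : Nat) (c : List String) (j : Nat) (v : String),
    c.length = g.length →
    setCell (writeCol g i c) j i v = writeCol g i (c.set j v) := by
  intro g
  induction g with
  | nil =>
    intro i c j v hlen
    have : c = [] := List.eq_nil_of_length_eq_zero (by simpa using hlen)
    subst this
    simp [writeCol, setCell]
  | cons r g ih =>
    intro i c j v hlen
    cases c with
    | nil => simp at hlen
    | cons w c' =>
      have hwc : writeCol (r :: g) i (w :: c') = (r.set i w) :: writeCol g i c' := rfl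
      rw [hwc]
      cases j with
      | zero => simp [setCell, writeCol, List.getD, List.set_set]
      | succ j =>
        have h1 : setCell ((r.set i w) :: writeCol g i c') (j + 1) i v
            = (r.set i w) :: setCell (writeCol g i c') j i v := by
          simp [setCell, List.getD]
        rw [h1, ih i c' j v (by simpa using hlen)]
        rfl

theorem writeCol_colOf : ∀ (g : List (List String)) (i : Nat),
    (∀ r ∈ g, i < r.length) → writeCol g i (colOf g i) = g := by
  intro g
  induction g with
  | nil => intro i _; rfl
  | cons r g ih =>
    intro i hInv
    have hi : i < r.length := hInv r (by simp)
    have h1 : writeCol (r :: g) i (colOf (r :: g) i) = (r.set i (r.getD i "")) :: writeCol g i (colOf g i) := rfl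
    rw [h1, ih i (fun r' hr' => hInv r' (by simp [hr']))]
    congr 1
    rw [List.getD_eq_getElem r "" hi]
    exact List.set_getElem_self hi

theorem rows_writeCol (P : Nat → Prop) : ∀ (g : List (List String)) (i : Nat) (c : List String),
    (∀ r ∈ g, P r.length) → ∀ r' ∈ writeCol g i c, P r'.length := by
  intro g
  induction g with
  | nil => intro i c _ r' hr'; simp [writeCol] at hr'
  | cons r g ih =>
    intro i c hg r' hr'
    cases c with
    | nil => simp [writeCol] at hr'
    | cons v c' =>
      rcases List.mem_cons.1 hr' with h | h
      · subst h; simpa using hg r (by simp)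
      · exact ih i c' (fun q hq => hg q (by simp [hq])) r' h

theorem innerA_writeCol (i : Nat) : ∀ (k : Nat) (g : List (List String)) (c : List String),
    (∀ r ∈ g, i < r.length) → c.length = g.length →
    innerA i k (writeCol g i c) = writeCol g i (innerC k c) := by
  intro k
  induction k with
  | zero => intro g c _ _; rfl
  | succ k ih =>
    intro g c hInv hlen
    simp only [innerA, innerC, getCell_writeCol g i c k hInv hlen]
    split_ifs
    · rfl
    · rw [setCell_writeCol g i c k "O" hlen,
        setCell_writeCol g i (c.set k "O") (k + 1) "." (by simpa using hlen)]
      exact ih g ((c.set k "O").set (k + 1) ".") hInv (by simpa using hlen)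

theorem foldrows_writeCol (i : Nat) (g : List (List String)) (hInv : ∀ r ∈ g, i < r.length) :
    ∀ (l : List Nat) (c : List String), c.length = g.length →
      l.foldl (fun m j => if getCell m j i ≠ "O" then m else innerA i j m) (writeCol g i c) =
        writeCol g i (l.foldl stepC c) := by
  intro l
  induction l with
  | nil => intro c _; rfl
  | cons j l ih =>
    intro c hlen
    simp only [List.foldl_cons]
    have hg := getCell_writeCol g i c j hInv hlen
    unfold stepC
    by_cases hc : c.getD j "" = "O"
    · simp only [hg, hc, ne_eq, not_true_eq_false, if_false, reduceIte]
      rw [innerA_writeCol i j g c hInv hlen]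
      exact ih (innerC j c) (by rw [length_innerC]; exact hlen)
    · simp only [hg, hc, ne_eq, not_false_eq_true, if_true, reduceIte]
      exact ih c hlen

theorem enumFold (i : Nat) : ∀ (c : List String) (g₁ g₂ : List (List String)),
    c.length = g₂.length →
    (PySem.List.enumerate c (g₁.length : Int)).foldl
        (fun g p => setCell g p.1.toNat i p.2) (g₁ ++ g₂) =
      g₁ ++ writeCol g₂ i c := by
  intro c
  induction c with
  | nil =>
    intro g₁ g₂ hlen
    have : g₂ = [] := List.eq_nil_of_length_eq_zero (by simpa using hlen.symm)
    subst this
    simp [PySem.List.enumerate, writeCol]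
  | cons v c' ih =>
    intro g₁ g₂ hlen
    cases g₂ with
    | nil => simp at hlen
    | cons r g₂' =>
      rw [PySem.List.enumerate_cons, List.foldl_cons]
      have h1 : setCell (g₁ ++ r :: g₂') ((g₁.length : Int)).toNat i v = (g₁ ++ [r.set i v]) ++ g₂' := by
        unfold setCell
        rw [Int.toNat_natCast, getD_append_len, set_append_len]
        simp
      rw [h1]
      have h2 : ((g₁.length : Int) + 1) = (((g₁ ++ [r.set i v]).length : Nat) : Int) := by
        simp
      rw [h2, ih (g₁ ++ [r.set i v]) g₂' (by simpa using hlen)]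
      have hwc : writeCol (r :: g₂') i (v :: c') = (r.set i v) :: writeCol g₂' i c' := rfl
      rw [hwc]
      simp

theorem percol (i : Nat) (g : List (List String)) (hInv : ∀ r ∈ g, i < r.length) :
    (List.range g.length).foldl (fun m j => if getCell m j i ≠ "O" then m else innerA i j m) g =
      writeCol g i (settle (colOf g i)) := by
  have h := foldrows_writeCol i g hInv (List.range g.length) (colOf g i) (length_colOf g i)
  rw [writeCol_colOf g i hInv] at h
  rw [h]
  congr 1
  rw [← length_colOf g i]
  exact rowC_aux (colOf g i).length (colOf g i) (le_refl _)

theorem percol_alt (i : Nat) (g : List (List String)) (hInv : ∀ r ∈ g, i < r.length) :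
    (PySem.List.enumerate (settle (colOf g i))).foldl
        (fun g p => setCell g p.1.toNat i p.2) g =
      writeCol g i (settle (colOf g i)) := by
  have h := enumFold i (settle (colOf g i)) [] g (by rw [settle_length, length_colOf])
  simpa using h

theorem fold_cong (nc nr : Nat) : ∀ (l : List Nat) (g : List (List String)),
    (∀ x ∈ l, x < nc) → g.length = nr → (∀ r ∈ g, nc ≤ r.length) →
      l.foldl (fun m i =>
        (List.range nr).foldl (fun m j => if getCell m j i ≠ "O" then m else innerA i j m) m) g =
      l.foldl (fun g i =>
        (PySem.List.enumerate (settle (g.map (fun row => row.getD i "")))).foldl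
          (fun g p => setCell g p.1.toNat i p.2) g) g := by
  intro l
  induction l with
  | nil => intro g _ _ _; rfl
  | cons x l ih =>
    intro g hl hnr hrows
    have hx : x < nc := hl x (by simp)
    have hInv : ∀ r ∈ g, x < r.length := fun r hr => lt_of_lt_of_le hx (hrows r hr)
    have hcol : g.map (fun row => row.getD x "") = colOf g x := rfl
    simp only [List.foldl_cons]
    have hp := percol x g hInv
    rw [hnr] at hp
    rw [hp, hcol, percol_alt x g hInv]
    have hlen' : (settle (colOf g x)).length = g.length := by rw [settle_length, length_colOf]
    exact ih (writeCol g x (settle (colOf g x)))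
      (fun y hy => hl y (by simp [hy]))
      (by rw [length_writeCol g x _ hlen', hnr])
      (rows_writeCol (fun n => nc ≤ n) g x (settle (colOf g x)) hrows)


-- ===== VERDICT (by name: the statement is the Claim_ definition above) =====
theorem shiftNorth_spec : Claim_equal_shiftNorth := by
  intro input _hdom hpre
  unfold Spec_shiftNorth shiftNorth shiftNorth_alt
  dsimp only
  exact (fold_cong (input.getD 0 []).length input.length (List.range (input.getD 0 []).length)
    input (fun x hx => List.mem_range.1 hx) rfl hpre.2)
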